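-- pv_equiv track=rewrite | github.com/odolan-gradient/SlackBot | CIMIS.py | get_county_stations
-- ===== SOURCE A (Python) =====
-- def get_county_stations(station_number: str, all_stations):
--     """
--     Gets all CIMIS stations in the county
--     :param station_number: The station number to find the county.
--     :param all_stations: The dictionary containing all stations.
--     :return: A tuple containing a dictionary of stations in the county and the station data for the given station number.
--     """
--     station_data = None
--     county = None
--     county_stations = {}
--     # First, find the county of the given station number
--     if all_stations:
--         for station in all_stations:
--
--             # Adding to the county list
--             if station['County'] in county_stations:
--                 county_stations[station['County']].append(station)
--             # First time adding to dict
--             else: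
--                 county_stations[station['County']] = [station]
--             # Get county
--             if station['StationNbr'] == station_number:
--                 county = station['County']
--                 station_data = station
--
--     if county is None:
--         # If no such station number exists, return the original dictionary and None
--         return all_stations, None
--
--     # Filter out stations not in the county
--     correct_county_stations = county_stations[county]
--     return correct_county_stations, station_data
-- ===== SOURCE B (Python) =====
-- def get_county_stations(station_number: str, all_stations):
--     # Simpler: no grouping dict; find the target (last match), then filter by its county.
--     county = None
--     station_data = None
--     for station in all_stations:
--         if station['StationNbr'] == station_number:
--             county = station['County']
--             station_data = station
--     if county is None:
--         return all_stations, None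
--     return [s for s in all_stations if s['County'] == county], station_data
-- ===== Notes on version B (the rewrite author's own statement) =====
-- stated objective: simpler
-- what changed: Drops the county-grouping dict entirely: one scan finds the target station (last match wins) and its county, a plain filter then selects that county's stations.
import Mathlib
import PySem

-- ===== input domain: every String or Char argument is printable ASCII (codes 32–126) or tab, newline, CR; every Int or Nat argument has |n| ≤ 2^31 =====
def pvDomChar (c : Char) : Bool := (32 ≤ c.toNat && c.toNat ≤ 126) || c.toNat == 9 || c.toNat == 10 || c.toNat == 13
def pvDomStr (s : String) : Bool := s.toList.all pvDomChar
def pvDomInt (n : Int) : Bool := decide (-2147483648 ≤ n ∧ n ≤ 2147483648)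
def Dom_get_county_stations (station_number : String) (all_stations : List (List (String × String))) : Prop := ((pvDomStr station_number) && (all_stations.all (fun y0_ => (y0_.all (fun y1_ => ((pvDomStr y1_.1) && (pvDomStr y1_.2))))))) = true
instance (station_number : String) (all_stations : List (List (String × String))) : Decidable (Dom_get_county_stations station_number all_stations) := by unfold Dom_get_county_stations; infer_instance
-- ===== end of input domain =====

-- B drops A's county-grouping dict: one scan finds the target station (last match) and its
-- county, then a plain filter selects that county's stations. Same return value on Pre_.


-- ===== PORT A =====
-- station[k] for a Python dict rendered as an association list: first match.
-- The "" default is never used under Pre_ (key present; on a missing key Python raises KeyError).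
def pyItem (s : List (String × String)) (k : String) : String :=
  ((s.find? (fun p => p.1 == k)).map (fun p => p.2)).getD ""

-- One iteration of A's loop body, state = (station_data, county, county_stations).
def stepA (station_number : String)
    (acc : Option (List (String × String)) × Option String ×
           PySem.Dict String (List (List (String × String))))
    (s : List (String × String)) :
    Option (List (String × String)) × Option String ×
    PySem.Dict String (List (List (String × String))) :=
  -- if station['County'] in county_stations: append; else: first insertion
  let d := if acc.2.2.contains (pyItem s "County")
           then acc.2.2.modify (pyItem s "County") [] (fun l => l ++ [s])
           else acc.2.2.insert (pyItem s "County") [s]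
  -- if station['StationNbr'] == station_number: county, station_data := …
  if pyItem s "StationNbr" == station_number
  then (some s, some (pyItem s "County"), d)
  else (acc.1, acc.2.1, d)

def get_county_stations (station_number : String) (all_stations : List (List (String × String))) : (List (List (String × String))) × (Option (List (String × String))) :=
  -- 'if all_stations:' only guards the loop; the fold over [] is already a no-op.
  match all_stations.foldl (stepA station_number) (none, none, PySem.Dict.empty) with
  | (_, none, _) => (all_stations, none)                             -- county is None
  | (station_data, some c, county_stations) =>
      (county_stations.getD c [], station_data)                      -- county_stations[county] (key present)

-- ===== PORT B =====
-- One iteration of B's loop body, state = (county, station_data).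
def stepB (station_number : String)
    (acc : Option String × Option (List (String × String)))
    (s : List (String × String)) :
    Option String × Option (List (String × String)) :=
  if pyItem s "StationNbr" == station_number
  then (some (pyItem s "County"), some s)
  else acc

def get_county_stations_alt (station_number : String) (all_stations : List (List (String × String))) : (List (List (String × String))) × (Option (List (String × String))) :=
  match all_stations.foldl (stepB station_number) (none, none) with
  | (none, _) => (all_stations, none)
  | (some c, station_data) =>
      (all_stations.filter (fun s => pyItem s "County" == c), station_data)

-- ===== PRECONDITION & SPEC =====
-- Pre_ excludes exactly the inputs where some station lacks a 'County' or 'StationNbr' key,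
-- on which the Python A raises KeyError.
def Pre_get_county_stations (station_number : String) (all_stations : List (List (String × String))) : Prop :=
  all_stations.all (fun s => (s.find? (fun p => p.1 == "County")).isSome
                          && (s.find? (fun p => p.1 == "StationNbr")).isSome) = true
instance (station_number : String) (all_stations : List (List (String × String))) : Decidable (Pre_get_county_stations station_number all_stations) := by unfold Pre_get_county_stations; infer_instance
def pvWitness_get_county_stations : String × (List (List (String × String))) :=
  ("12", [[("StationNbr", "12"), ("County", "Yolo")], [("StationNbr", "7"), ("County", "Kern")]])

def Spec_get_county_stations (station_number : String) (all_stations : List (List (String × String))) (out : (List (List (String × String))) × (Option (List (String × String)))) : Prop := out = get_county_stations_alt station_number all_stations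
instance (station_number : String) (all_stations : List (List (String × String))) (out : (List (List (String × String))) × (Option (List (String × String)))) : Decidable (Spec_get_county_stations station_number all_stations out) := by unfold Spec_get_county_stations; infer_instance

-- ===== CLAIM (what is proved, stated in full; the proofs are below) =====
def Claim_equal_get_county_stations : Prop := ∀ (station_number : String) (all_stations : List (List (String × String))), Dom_get_county_stations station_number all_stations → Pre_get_county_stations station_number all_stations → Spec_get_county_stations station_number all_stations (get_county_stations station_number all_stations)

-- ===== LEMMAS AND PROOFS =====

-- A's two-branch dict update looks up key x like a single 'modify … (· ++ [s])'.
theorem stepA_dict_getD (sn : String)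
    (acc : Option (List (String × String)) × Option String ×
           PySem.Dict String (List (List (String × String))))
    (s : List (String × String)) (x : String) :
    ((stepA sn acc s).2.2).getD x []
      = acc.2.2.getD x [] ++ (if pyItem s "County" == x then [s] else []) := by
  have hd : (stepA sn acc s).2.2
      = (if acc.2.2.contains (pyItem s "County")
         then acc.2.2.modify (pyItem s "County") [] (fun l => l ++ [s])
         else acc.2.2.insert (pyItem s "County") [s]) := by
    unfold stepA
    by_cases hn : (pyItem s "StationNbr" == sn) = true <;> simp [hn]
  rw [hd]
  by_cases hc : acc.2.2.contains (pyItem s "County") = true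
  · rw [if_pos hc, PySem.Dict.getD_modify]
    by_cases hx : x = pyItem s "County"
    · simp [hx]
    · have hx' : ¬ pyItem s "County" = x := fun h => hx h.symm
      simp [hx, hx']
  · rw [if_neg hc, PySem.Dict.getD_insert]
    by_cases hx : x = pyItem s "County"
    · simp [hx, PySem.Dict.getD_of_not_contains _ _ (by simpa using hc)]
    · have hx' : ¬ pyItem s "County" = x := fun h => hx h.symm
      simp [hx, hx']

-- The dict accumulated by A's fold, looked up at any county x, is the filter of the input.
theorem foldA_dict_getD (sn : String) (l : List (List (String × String)))
    (acc : Option (List (String × String)) × Option String ×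
           PySem.Dict String (List (List (String × String))))
    (x : String) :
    ((l.foldl (stepA sn) acc).2.2).getD x []
      = acc.2.2.getD x [] ++ l.filter (fun s => pyItem s "County" == x) := by
  induction l generalizing acc with
  | nil => simp
  | cons s t ih =>
      simp only [List.foldl_cons, List.filter_cons, ih, stepA_dict_getD]
      by_cases h : (pyItem s "County" == x) = true <;> simp [h]

-- The (station_data, county) components of A's fold are B's fold, components swapped.
theorem foldA_pair (sn : String) (l : List (List (String × String)))
    (a : Option (List (String × String))) (c : Option String)
    (d : PySem.Dict String (List (List (String × String)))) :
    ((l.foldl (stepA sn) (a, c, d)).1, (l.foldl (stepA sn) (a, c, d)).2.1)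
      = ((l.foldl (stepB sn) (c, a)).2, (l.foldl (stepB sn) (c, a)).1) := by
  induction l generalizing a c d with
  | nil => rfl
  | cons s t ih =>
      simp only [List.foldl_cons, stepA, stepB]
      by_cases h : (pyItem s "StationNbr" == sn) = true <;> simp [h, ih]

-- ===== VERDICT (by name: the statement is the Claim_ definition above) =====
theorem get_county_stations_spec : Claim_equal_get_county_stations := by
  intro sn l _ _
  unfold Spec_get_county_stations get_county_stations get_county_stations_alt
  have hp := foldA_pair sn l none none PySem.Dict.empty
  have hd := foldA_dict_getD sn l (none, none, PySem.Dict.empty)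
  rcases hA : l.foldl (stepA sn) (none, none, PySem.Dict.empty) with ⟨a, co, d⟩
  rcases hB : l.foldl (stepB sn) (none, none) with ⟨cb, b⟩
  rw [hA, hB] at hp
  simp only [Prod.mk.injEq] at hp
  obtain ⟨h1, h2⟩ := hp
  rw [hA] at hd
  subst h1 h2
  cases co with
  | none => rfl
  | some c => simpa using hd c
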